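-- pv_equiv track=rewrite | github.com/chapmancl/mongo-examples | MongoMCP/mongomcp/agent/tool_router.py | _scope_from_tools
-- ===== SOURCE A (Python) =====
-- from typing import Any, Callable, Dict, List, Optional, Tuple
--
-- def _scope_from_tools(tool_names: List[str]) -> Optional[str]:
--     """Derive an endpoint scope string from prefixed tool names.
--
--     Tool names are formatted as ``{endpoint}_{tool}`` (e.g.
--     ``shipwreckSearch_geospatial_search``).  This extracts the unique
--     endpoint prefix(es) and joins them with ``+``.
--
--     Returns None if no endpoints can be extracted.
--     """
--     endpoints = set()
--     for name in tool_names: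
--         parts = name.split("_")
--         if len(parts) >= 2:
--             for i in range(1, len(parts)):
--                 candidate = "_".join(parts[:i])
--                 if any(c.isupper() for c in candidate):
--                     endpoints.add(candidate)
--                     break
--             else:
--                 endpoints.add(parts[0])
--         else:
--             endpoints.add(name)
--     return "+".join(sorted(endpoints)) if endpoints else None
-- ===== SOURCE B (Python) =====
-- from typing import List, Optional
--
-- def _scope_from_tools(tool_names: List[str]) -> Optional[str]:
--     """Single left-to-right character scan per name: at the first '_' seen after
--     an uppercase letter, the prefix before it is the endpoint; otherwise fall
--     back to the prefix before the first '_' (or the whole name if none)."""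
--     endpoints = set()
--     for name in tool_names:
--         seen_upper = False
--         fallback = None
--         prefix = None
--         acc = []
--         for c in name:
--             if c == '_':
--                 if seen_upper:
--                     prefix = ''.join(acc)
--                     break
--                 if fallback is None:
--                     fallback = ''.join(acc)
--             else:
--                 seen_upper = seen_upper or c.isupper()
--             acc.append(c)
--         if prefix is None:
--             prefix = name if fallback is None else fallback
--         endpoints.add(prefix)
--     return "+".join(sorted(endpoints)) if endpoints else None
-- ===== Notes on version B (the rewrite author's own statement) =====
-- stated objective: alternative
-- what changed: B replaces A's split('_') plus rebuilding every prefix candidate via '_'.join(parts[:i]) with a single left-to-right character scan per name tracking a seen-uppercase flag and the prefix before the first underscore; it trades A's library split/join calls for one explicit linear scan.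
import Mathlib
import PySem

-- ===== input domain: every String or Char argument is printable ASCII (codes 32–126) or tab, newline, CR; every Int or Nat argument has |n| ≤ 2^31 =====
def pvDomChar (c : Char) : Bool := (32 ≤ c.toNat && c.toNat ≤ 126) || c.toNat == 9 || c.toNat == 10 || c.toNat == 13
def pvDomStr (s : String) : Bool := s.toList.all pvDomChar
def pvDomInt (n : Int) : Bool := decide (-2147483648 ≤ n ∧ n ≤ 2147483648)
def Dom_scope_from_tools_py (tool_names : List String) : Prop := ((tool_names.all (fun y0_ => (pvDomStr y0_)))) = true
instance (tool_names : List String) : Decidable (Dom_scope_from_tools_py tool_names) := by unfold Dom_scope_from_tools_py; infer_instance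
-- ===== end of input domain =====

-- ===== PORT A =====
-- B re-does the per-name extraction in one character scan instead of split + join-per-prefix (objective: alternative, same result).

-- A's inner 'for i in range(1, len(parts)): … break / else: parts[0]' loop.
def pvAScan (parts : List (List Char)) (i : Nat) : List Char :=
  if h : i < parts.length then
    let candidate := PySem.Chars.join ['_'] (parts.take i)
    if candidate.any PySem.Chars.isupper then candidate
    else pvAScan parts (i + 1)
  else parts.headD []   -- the for-else: endpoints.add(parts[0]); parts of split is never empty
termination_by parts.length - i
decreasing_by omega

-- per-name body of A's outer loop
def pvAExtract (name : String) : String :=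
  let parts := PySem.Chars.splitOn name.toList ['_']
  if 2 ≤ parts.length then String.ofList (pvAScan parts 1)
  else name

def scope_from_tools_py (tool_names : List String) : Option String :=
  let endpoints : PySem.Set String :=
    tool_names.foldl (fun eps name => PySem.Set.add eps (pvAExtract name)) PySem.Set.empty
  if endpoints.isEmpty then none
  else some (String.ofList (PySem.Chars.join ['+']
    ((PySem.List.sorted endpoints (fun s => s) false).map String.toList)))

-- ===== PORT B =====
-- Source B's inner character loop: state = (acc, seen_upper, fallback); returns the prefix.
def pvBGo (name : List Char) : List Char → List Char → Bool → Option (List Char) → List Char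
  | [], _, _, fb => fb.getD name           -- prefix is None: name if fallback is None else fallback
  | c :: rest, acc, su, fb =>
      if c = '_' then
        if su then acc                      -- prefix = ''.join(acc); break
        else pvBGo name rest (acc ++ [c]) su (if fb.isNone then some acc else fb)
      else pvBGo name rest (acc ++ [c]) (su || PySem.Chars.isupper c) fb

def pvBExtract (name : String) : String :=
  String.ofList (pvBGo name.toList name.toList [] false none)

def scope_from_tools_py_alt (tool_names : List String) : Option String :=
  let endpoints : PySem.Set String :=
    tool_names.foldl (fun eps name => PySem.Set.add eps (pvBExtract name)) PySem.Set.empty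
  if endpoints.isEmpty then none
  else some (String.ofList (PySem.Chars.join ['+']
    ((PySem.List.sorted endpoints (fun s => s) false).map String.toList)))

-- ===== PRECONDITION & SPEC =====
def Spec_scope_from_tools_py (tool_names : List String) (out : Option String) : Prop := out = scope_from_tools_py_alt tool_names
instance (tool_names : List String) (out : Option String) : Decidable (Spec_scope_from_tools_py tool_names out) := by unfold Spec_scope_from_tools_py; infer_instance

-- ===== CLAIM (what is proved, stated in full; the proofs are below) =====
def Claim_equal_scope_from_tools_py : Prop := ∀ (tool_names : List String), Dom_scope_from_tools_py tool_names → Spec_scope_from_tools_py tool_names (scope_from_tools_py tool_names)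

-- ===== LEMMAS AND PROOFS =====

-- reference splitter: what name.split('_') produces, structurally
def pvSplit : List Char → List (List Char)
  | [] => [[]]
  | c :: rest =>
      if c = '_' then [] :: pvSplit rest
      else match pvSplit rest with
           | [] => [[c]]          -- unreachable: pvSplit is never []
           | q :: qs => (c :: q) :: qs

lemma pvSplit_ne_nil (cs : List Char) : pvSplit cs ≠ [] := by
  cases cs with
  | nil => simp [pvSplit]
  | cons c rest =>
    simp only [pvSplit]
    split
    · simp
    · split <;> simp

lemma pvSplit_free (cs : List Char) : ∀ p ∈ pvSplit cs, '_' ∉ p := by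
  induction cs with
  | nil => simp [pvSplit]
  | cons c rest ih =>
    simp only [pvSplit]
    split
    · intro p hp
      rcases List.mem_cons.mp hp with h | h
      · simp [h]
      · exact ih p h
    · rename_i hc
      rcases hq : pvSplit rest with _ | ⟨q, qs⟩
      · exact absurd hq (pvSplit_ne_nil rest)
      · intro p hp
        rcases List.mem_cons.mp hp with h | h
        · subst h
          intro hm
          rcases List.mem_cons.mp hm with hm | hm
          · exact hc hm.symm
          · exact ih q (by simp [hq]) hm
        · exact ih p (by rw [hq]; exact List.mem_cons_of_mem q h)

lemma pvSplit_join (cs : List Char) : PySem.Chars.join ['_'] (pvSplit cs) = cs := by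
  induction cs with
  | nil => simp [pvSplit, PySem.Chars.join_singleton]
  | cons c rest ih =>
    simp only [pvSplit]
    split
    · rename_i hc
      rcases hq : pvSplit rest with _ | ⟨q, qs⟩
      · exact absurd hq (pvSplit_ne_nil rest)
      · rw [hq] at ih
        rw [PySem.Chars.join_cons_cons]
        simp [ih, hc]
    · rcases hq : pvSplit rest with _ | ⟨q, qs⟩
      · exact absurd hq (pvSplit_ne_nil rest)
      · rw [hq] at ih
        cases qs with
        | nil =>
          simp [PySem.Chars.join_singleton] at ih ⊢
          simp [ih]
        | cons q' qs' =>
          rw [PySem.Chars.join_cons_cons] at ih ⊢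
          simp at ih ⊢
          simp [ih]

-- PySem's splitOn with separator '_' computes pvSplit
lemma pvSplitOn_go (fuel : Nat) (l cur : List Char) (acc : List (List Char))
    (hf : l.length ≤ fuel) :
    PySem.Chars.splitOn.go ['_'] fuel l cur acc =
      acc.reverse ++ (match pvSplit l with
        | [] => []
        | q :: qs => (cur.reverse ++ q) :: qs) := by
  induction fuel generalizing l cur acc with
  | zero =>
    have : l = [] := by
      cases l with
      | nil => rfl
      | cons a b => simp at hf
    subst this
    simp [PySem.Chars.splitOn.go, pvSplit]
  | succ fuel ih =>
    cases l with
    | nil => simp [PySem.Chars.splitOn.go, pvSplit]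
    | cons c rest =>
      simp only [PySem.Chars.splitOn.go]
      by_cases hc : c = '_'
      · have hpre : List.isPrefixOf ['_'] (c :: rest) = true := by
          simp [List.isPrefixOf, hc]
        rw [if_pos hpre]
        have hlen : (List.drop (['_'] : List Char).length (c :: rest)) = rest := by simp
        rw [hlen]
        rw [ih rest [] (cur.reverse :: acc) (by simp at hf; omega)]
        simp only [pvSplit, if_pos hc]
        rcases hq : pvSplit rest with _ | ⟨q, qs⟩
        · exact absurd hq (pvSplit_ne_nil rest)
        · simp
      · have hpre : List.isPrefixOf ['_'] (c :: rest) = false := by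
          simp [List.isPrefixOf]
          exact fun h => hc h.symm
        rw [if_neg (by simp [hpre])]
        rw [ih rest (c :: cur) acc (by simp at hf; omega)]
        simp only [pvSplit, if_neg hc]
        rcases hq : pvSplit rest with _ | ⟨q, qs⟩
        · exact absurd hq (pvSplit_ne_nil rest)
        · simp

lemma pvSplitOn_eq (cs : List Char) :
    PySem.Chars.splitOn cs ['_'] = pvSplit cs := by
  show PySem.Chars.splitOn.go ['_'] (cs.length + 1) cs [] [] = _
  rw [pvSplitOn_go (cs.length + 1) cs [] [] (by omega)]
  rcases hq : pvSplit cs with _ | ⟨q, qs⟩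
  · exact absurd hq (pvSplit_ne_nil cs)
  · simp

-- the common characterisation of the per-name extraction, on the parts list
def pvE (ps : List (List Char)) : List Char :=
  match ps.dropLast.findIdx? (fun p => p.any PySem.Chars.isupper) with
  | some j => PySem.Chars.join ['_'] (ps.take (j + 1))
  | none => ps.headD []

-- A's search loop as an Option-returning function (proof helper)
def pvAFind (parts : List (List Char)) (i : Nat) : Option (List Char) :=
  if h : i < parts.length then
    if (PySem.Chars.join ['_'] (parts.take i)).any PySem.Chars.isupper then
      some (PySem.Chars.join ['_'] (parts.take i))
    else pvAFind parts (i + 1)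
  else none
termination_by parts.length - i
decreasing_by omega

lemma pvAScan_eq_find (parts : List (List Char)) (i : Nat) :
    pvAScan parts i = (pvAFind parts i).getD (parts.headD []) := by
  fun_induction pvAFind parts i with
  | case1 i h hc => rw [pvAScan]; simp only [dif_pos h]; simp [hc]
  | case2 i h hc ih => rw [pvAScan]; simp only [dif_pos h]; simp only [ih]; simp [hc]
  | case3 i h => rw [pvAScan]; simp [h]

lemma pvAFind_shift (p : List Char) (hp : p.any PySem.Chars.isupper = false)
    (ps : List (List Char)) (i : Nat) (hi : 1 ≤ i) :
    pvAFind (p :: ps) (i + 1) = (pvAFind ps i).map (fun c => p ++ '_' :: c) := by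
  have hu : PySem.Chars.isupper '_' = false := by decide
  fun_induction pvAFind ps i with
  | case1 i h hc =>
    rw [pvAFind]
    have h' : i + 1 < (p :: ps).length := by simp; omega
    rw [dif_pos h']
    obtain ⟨q, ps', rfl⟩ : ∃ q ps', ps = q :: ps' := by
      cases ps with
      | nil => simp at h
      | cons a b => exact ⟨a, b, rfl⟩
    obtain ⟨i', rfl⟩ : ∃ i', i = i' + 1 := ⟨i - 1, by omega⟩
    simp only [List.take_succ_cons, PySem.Chars.join_cons_cons] at hc ⊢
    simp [List.any_append, hp, hu, hc]
  | case2 i h hc ih =>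
    rw [pvAFind]
    have h' : i + 1 < (p :: ps).length := by simp; omega
    rw [dif_pos h']
    obtain ⟨q, ps', rfl⟩ : ∃ q ps', ps = q :: ps' := by
      cases ps with
      | nil => simp at h
      | cons a b => exact ⟨a, b, rfl⟩
    obtain ⟨i', rfl⟩ : ∃ i', i = i' + 1 := ⟨i - 1, by omega⟩
    simp only [List.take_succ_cons, PySem.Chars.join_cons_cons] at hc ⊢
    rw [if_neg (by simp [List.any_append, hp, hu]; simpa using hc)]
    exact ih (by omega)
  | case3 i h =>
    rw [pvAFind]
    have h' : ¬ (i + 1 < (p :: ps).length) := by simp; omega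
    rw [dif_neg h']
    simp

lemma pvJoin_cons_of_ne_nil (p : List Char) (l : List (List Char)) (h : l ≠ []) :
    PySem.Chars.join ['_'] (p :: l) = p ++ '_' :: PySem.Chars.join ['_'] l := by
  cases l with
  | nil => exact absurd rfl h
  | cons q qs => rw [PySem.Chars.join_cons_cons]; simp

lemma pvAFind_spec (ps : List (List Char)) (hne : ps ≠ []) :
    pvAFind ps 1 =
      match ps.dropLast.findIdx? (fun p => p.any PySem.Chars.isupper) with
      | some j => some (PySem.Chars.join ['_'] (ps.take (j + 1)))
      | none => none := by
  induction ps with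
  | nil => exact absurd rfl hne
  | cons p t ih =>
    cases t with
    | nil =>
      rw [pvAFind]
      simp
    | cons q t' =>
      rw [pvAFind]
      rw [dif_pos (by simp)]
      have htake : (p :: q :: t').take 1 = [p] := by simp
      rw [htake, PySem.Chars.join_singleton]
      have hdl : (p :: q :: t').dropLast = p :: (q :: t').dropLast := by simp
      rw [hdl, List.findIdx?_cons]
      by_cases hp : p.any PySem.Chars.isupper
      · simp [hp, htake, PySem.Chars.join_singleton]
      · rw [if_neg (by simp [hp]), if_neg (by simpa using hp)]
        rw [pvAFind_shift p (by simpa using hp) (q :: t') 1 (by omega)]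
        rw [ih (by simp)]
        rcases hidx : (q :: t').dropLast.findIdx? (fun p => p.any PySem.Chars.isupper) with _ | j
        · simp only [hidx, Option.map_none]
        · simp only [hidx, Option.map_some]
          have htk : List.take (j + 1 + 1) (p :: q :: t') = p :: List.take (j + 1) (q :: t') := by simp
          rw [htk, pvJoin_cons_of_ne_nil _ _ (by simp)]

lemma pvBGo_chunk (p : List Char) (hfree : '_' ∉ p) :
    ∀ (name rest acc : List Char) (su : Bool) (fb : Option (List Char)),
    pvBGo name (p ++ rest) acc su fb
      = pvBGo name rest (acc ++ p) (su || p.any PySem.Chars.isupper) fb := by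
  induction p with
  | nil => intro name rest acc su fb; simp
  | cons c p' ih =>
    intro name rest acc su fb
    have hc : ¬ (c = '_') := by intro h; exact hfree (by simp [h])
    rw [List.cons_append, pvBGo, if_neg hc]
    rw [ih (by intro h; exact hfree (List.mem_cons_of_mem c h))]
    simp [Bool.or_assoc]

lemma pvBMain (ps : List (List Char)) (hne : ps ≠ [])
    (hfree : ∀ p ∈ ps, '_' ∉ p) :
    ∀ (name acc : List Char) (fb : Option (List Char)),
    pvBGo name (PySem.Chars.join ['_'] ps) acc false fb =
      match ps.dropLast.findIdx? (fun p => p.any PySem.Chars.isupper) with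
      | some j => acc ++ PySem.Chars.join ['_'] (ps.take (j + 1))
      | none => fb.getD (if ps.length = 1 then name else acc ++ ps.headD []) := by
  induction ps with
  | nil => exact absurd rfl hne
  | cons p t ih =>
    intro name acc fb
    cases t with
    | nil =>
      rw [PySem.Chars.join_singleton]
      have hch := pvBGo_chunk p (hfree p (by simp)) name [] acc false fb
      rw [List.append_nil] at hch
      rw [hch]
      simp [pvBGo]
    | cons q t' =>
      rw [pvJoin_cons_of_ne_nil p (q :: t') (by simp),
          pvBGo_chunk p (hfree p (by simp)) name _ acc false fb]
      rw [pvBGo, if_pos rfl]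
      have hdl : (p :: q :: t').dropLast = p :: (q :: t').dropLast := by simp
      rw [hdl, List.findIdx?_cons]
      by_cases hp : p.any PySem.Chars.isupper
      · rw [if_pos (by simp [hp])]
        simp only [hp, if_pos]
        simp [PySem.Chars.join_singleton]
      · have hp' : p.any PySem.Chars.isupper = false := by simpa using hp
        rw [if_neg (show ¬ ((false || p.any PySem.Chars.isupper) = true) by simp [hp'])]
        simp only [hp', Bool.false_eq_true, if_false, Bool.or_self]
        rw [ih (by simp) (fun r hr => hfree r (List.mem_cons_of_mem p hr)) name
            (acc ++ p ++ ['_']) (if fb.isNone then some (acc ++ p) else fb)]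
        rcases hidx : (q :: t').dropLast.findIdx? (fun p => p.any PySem.Chars.isupper) with _ | j
        · simp only [hidx, Option.map_none]
          rw [if_neg (show ¬ ((p :: q :: t').length = 1) by simp)]
          cases fb <;> simp
        · simp only [hidx, Option.map_some]
          have htk : List.take (j + 1 + 1) (p :: q :: t') = p :: List.take (j + 1) (q :: t') := by simp
          rw [htk, pvJoin_cons_of_ne_nil _ _ (by simp)]
          simp

lemma pvAExtract_eq (name : String) :
    pvAExtract name = String.ofList (pvE (pvSplit name.toList)) := by
  unfold pvAExtract
  rw [pvSplitOn_eq]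
  rcases hq : pvSplit name.toList with _ | ⟨q, qs⟩
  · exact absurd hq (pvSplit_ne_nil _)
  · cases qs with
    | nil =>
      have : ¬ (2 ≤ ([q] : List (List Char)).length) := by simp
      rw [if_neg this]
      have hcs : q = name.toList := by
        have := pvSplit_join name.toList
        rw [hq, PySem.Chars.join_singleton] at this
        exact this
      simp [pvE, hcs]
    | cons q' qs' =>
      rw [if_pos (by simp)]
      rw [pvAScan_eq_find, pvAFind_spec (q :: q' :: qs') (by simp)]
      unfold pvE
      rcases hidx : List.findIdx? (fun p => p.any PySem.Chars.isupper) (q :: (q' :: qs').dropLast) with _ | j <;>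
        simp [hidx]

lemma pvBExtract_eq (name : String) :
    pvBExtract name = String.ofList (pvE (pvSplit name.toList)) := by
  unfold pvBExtract
  have hjoin : name.toList = PySem.Chars.join ['_'] (pvSplit name.toList) :=
    (pvSplit_join name.toList).symm
  conv_lhs => rw [show pvBGo name.toList name.toList [] false none
    = pvBGo name.toList (PySem.Chars.join ['_'] (pvSplit name.toList)) [] false none by rw [← hjoin]]
  rw [pvBMain (pvSplit name.toList) (pvSplit_ne_nil _) (pvSplit_free _) name.toList [] none]
  unfold pvE
  rcases hidx : (pvSplit name.toList).dropLast.findIdx? (fun p => p.any PySem.Chars.isupper) with _ | j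
  · simp only [Option.getD_none]
    rcases hq : pvSplit name.toList with _ | ⟨q, qs⟩
    · exact absurd hq (pvSplit_ne_nil _)
    · cases qs with
      | nil =>
        have hcs : q = name.toList := by
          have := pvSplit_join name.toList
          rw [hq, PySem.Chars.join_singleton] at this
          exact this
        simp [hcs]
      | cons q' qs' => simp
  · simp only [hidx, List.nil_append]

lemma pvExtract_eq (name : String) : pvAExtract name = pvBExtract name := by
  rw [pvAExtract_eq, pvBExtract_eq]

-- ===== VERDICT (by name: the statement is the Claim_ definition above) =====
theorem scope_from_tools_py_spec : Claim_equal_scope_from_tools_py := by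
  intro tool_names _
  unfold Spec_scope_from_tools_py scope_from_tools_py scope_from_tools_py_alt
  simp only [pvExtract_eq]
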